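-- pv_equiv track=rewrite | github.com/UrseAdrianDinu/NLP | M3/DetectingMahine-GeneratedOffensiveLanguage/preprocessing.py | refer_normalize
-- ===== SOURCE A (Python) =====
-- def refer_normalize(tokens):
--     words = []
--     for idx in range(len(tokens)):
--         if idx + 1 != len(tokens) and tokens[idx].startswith("@") and tokens[idx + 1].startswith("@"):
--             continue
--         else:
--             words.append(tokens[idx])
--     return words
-- ===== SOURCE B (Python) =====
-- def refer_normalize(tokens):
--     # Run-based decomposition: split tokens into maximal consecutive runs of
--     # @-tokens / non-@-tokens; keep only the last token of each @-run and
--     # every token of each non-@ run.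
--     words = []
--     i = 0
--     n = len(tokens)
--     while i < n:
--         k = tokens[i].startswith("@")
--         j = i + 1
--         while j < n and tokens[j].startswith("@") == k:
--             j += 1
--         run = tokens[i:j]
--         if k:
--             words.append(run[-1])
--         else:
--             words.extend(run)
--         i = j
--     return words
-- ===== Notes on version B (the rewrite author's own statement) =====
-- stated objective: alternative
-- what changed: Replaces the index loop with a pairwise lookahead test by a run-splitting pass: tokens are grouped into maximal consecutive runs by whether they start with '@', keeping only the last token of each @-run and all tokens of non-@ runs.
import Mathlib
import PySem

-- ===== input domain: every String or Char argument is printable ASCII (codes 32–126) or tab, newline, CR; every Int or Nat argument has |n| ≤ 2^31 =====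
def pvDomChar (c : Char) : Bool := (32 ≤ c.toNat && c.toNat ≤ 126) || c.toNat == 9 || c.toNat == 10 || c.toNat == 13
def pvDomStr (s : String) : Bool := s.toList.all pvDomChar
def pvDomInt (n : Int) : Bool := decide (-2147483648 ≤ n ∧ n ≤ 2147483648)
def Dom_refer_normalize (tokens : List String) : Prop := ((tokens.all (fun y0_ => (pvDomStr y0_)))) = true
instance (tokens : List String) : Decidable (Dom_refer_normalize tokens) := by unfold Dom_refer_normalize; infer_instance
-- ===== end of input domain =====

-- B replaces A's index loop with a lookahead pair test by a run-splitting pass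
-- (keep the last token of each maximal @-run, all tokens of non-@ runs); same cost, different decomposition.

-- ===== PORT A =====
-- index loop: keep tokens[idx] unless idx+1 != len and tokens[idx], tokens[idx+1] both start with "@"
def refer_normalize (tokens : List String) : List String :=
  (PySem.List.pyRange 0 (tokens.length : Int) 1).foldl
    (fun words idx =>
      if idx + 1 ≠ (tokens.length : Int) ∧
         PySem.Str.startswith (PySem.List.pyGetD tokens idx "") "@" = true ∧
         PySem.Str.startswith (PySem.List.pyGetD tokens (idx + 1) "") "@" = true
      then words
      else words ++ [PySem.List.pyGetD tokens idx ""]) []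

-- ===== PORT B =====
-- run-splitting recursion: the outer while-loop of Source B; the inner while-loop that
-- collects the run is takeWhile/dropWhile on the same predicate.
def refer_normalize_alt (tokens : List String) : List String :=
  match tokens with
  | [] => []
  | head :: rest0 =>
    let k := PySem.Str.startswith head "@"
    let run := head :: rest0.takeWhile (fun x => PySem.Str.startswith x "@" == k)
    let rest := rest0.dropWhile (fun x => PySem.Str.startswith x "@" == k)
    (if k then [PySem.List.pyGetD run (-1) ""] else run) ++ refer_normalize_alt rest
termination_by tokens.length
decreasing_by
  simp only [List.length_cons]
  exact Nat.lt_succ_of_le (List.dropWhile_sublist _).length_le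

-- ===== PRECONDITION & SPEC =====
def Spec_refer_normalize (tokens : List String) (out : List String) : Prop := out = refer_normalize_alt tokens
instance (tokens : List String) (out : List String) : Decidable (Spec_refer_normalize tokens out) := by unfold Spec_refer_normalize; infer_instance

-- ===== CLAIM (what is proved, stated in full; the proofs are below) =====
def Claim_equal_refer_normalize : Prop := ∀ (tokens : List String), Dom_refer_normalize tokens → Spec_refer_normalize tokens (refer_normalize tokens)

-- ===== LEMMAS AND PROOFS =====

-- reference recursion: pairwise-lookahead form both ports are reduced to
def pairF : List String → List String
  | [] => []
  | [a] => [a]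
  | a :: b :: ts =>
    if PySem.Str.startswith a "@" = true ∧ PySem.Str.startswith b "@" = true
    then pairF (b :: ts) else a :: pairF (b :: ts)

theorem pairF_not_at (a : String) (ts : List String)
    (h : PySem.Str.startswith a "@" = false) : pairF (a :: ts) = a :: pairF ts := by
  cases ts with
  | nil => rfl
  | cons b bs =>
    rw [pairF, if_neg]
    rintro ⟨h1, -⟩
    rw [h] at h1
    exact Bool.false_ne_true h1

theorem pairF_append_not_at (run rest : List String)
    (h : ∀ x ∈ run, PySem.Str.startswith x "@" = false) :
    pairF (run ++ rest) = run ++ pairF rest := by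
  induction run with
  | nil => rfl
  | cons a run ih =>
    have := pairF_not_at a (run ++ rest) (h a (by simp))
    simp only [List.cons_append, this, ih (fun x hx => h x (by simp [hx]))]

theorem pairF_at_run (a : String) (run rest : List String)
    (ha : PySem.Str.startswith a "@" = true)
    (hrun : ∀ x ∈ run, PySem.Str.startswith x "@" = true)
    (hrest : ∀ r rs, rest = r :: rs → PySem.Str.startswith r "@" = false) :
    pairF (a :: run ++ rest) = (a :: run).getLast (by simp) :: pairF rest := by
  induction run generalizing a with
  | nil =>
    cases rest with
    | nil => simp [pairF]
    | cons r rs =>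
      have hr := hrest r rs rfl
      show pairF (a :: r :: rs) = a :: pairF (r :: rs)
      rw [pairF, if_neg]
      rintro ⟨-, h2⟩
      rw [hr] at h2
      exact Bool.false_ne_true h2
  | cons b run ih =>
    have hb : PySem.Str.startswith b "@" = true := hrun b (by simp)
    have h1 : pairF (a :: b :: (run ++ rest)) = pairF (b :: (run ++ rest)) := by
      rw [pairF, if_pos ⟨ha, hb⟩]
    have h2 := ih b hb (fun x hx => hrun x (by simp [hx]))
    simp only [List.cons_append] at h1 h2 ⊢
    rw [h1, h2]
    congr 1

-- B = pairF
theorem alt_eq_pairF (tokens : List String) : refer_normalize_alt tokens = pairF tokens := by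
  induction tokens using refer_normalize_alt.induct with
  | case1 =>
    rw [refer_normalize_alt]
    rfl
  | case2 head rest0 k rest ih =>
    have ih' : refer_normalize_alt (rest0.dropWhile
        (fun x => PySem.Str.startswith x "@" == PySem.Str.startswith head "@"))
      = pairF (rest0.dropWhile
        (fun x => PySem.Str.startswith x "@" == PySem.Str.startswith head "@")) := ih
    clear ih
    clear rest
    clear k
    rw [refer_normalize_alt]
    cases hk : PySem.Str.startswith head "@" with
    | false =>
      simp only [hk] at ih' ⊢
      rw [if_neg Bool.false_ne_true, ih']
      have hsplit : head :: rest0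
          = (head :: rest0.takeWhile (fun x => PySem.Str.startswith x "@" == false))
            ++ rest0.dropWhile (fun x => PySem.Str.startswith x "@" == false) := by
        simp
      conv_rhs => rw [hsplit]
      rw [pairF_append_not_at _ _ ?_]
      intro x hx
      rcases List.mem_cons.mp hx with h | h
      · subst h; exact hk
      · have := List.mem_takeWhile_imp h
        simpa using this
    | true =>
      simp only [hk] at ih' ⊢
      rw [if_pos trivial, ih']
      have hsplit : head :: rest0
          = (head :: rest0.takeWhile (fun x => PySem.Str.startswith x "@" == true))
            ++ rest0.dropWhile (fun x => PySem.Str.startswith x "@" == true) := by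
        simp
      conv_rhs => rw [hsplit]
      rw [pairF_at_run head _ _ hk ?_ ?_]
      · rw [PySem.List.pyGetD_neg_one _ "" (List.cons_ne_nil _ _)]
        rfl
      · intro x hx
        have := List.mem_takeWhile_imp hx
        simpa using this
      · intro r rs hr
        have hhd : ((rest0.dropWhile
            (fun x => PySem.Str.startswith x "@" == true)).head?) = some r := by
          rw [hr]
          rfl
        have := List.head?_dropWhile_not
          (fun x => PySem.Str.startswith x "@" == true) rest0
        rw [hhd] at this
        simpa using this

-- A = pairF : loop invariant over the index range, stated on the suffix tokens.drop i
theorem loopA (tokens : List String) (i : Nat) (acc : List String) (h : i ≤ tokens.length) :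
    (PySem.List.pyRange (i : Int) (tokens.length : Int) 1).foldl
      (fun words idx =>
        if idx + 1 ≠ (tokens.length : Int) ∧
           PySem.Str.startswith (PySem.List.pyGetD tokens idx "") "@" = true ∧
           PySem.Str.startswith (PySem.List.pyGetD tokens (idx + 1) "") "@" = true
        then words
        else words ++ [PySem.List.pyGetD tokens idx ""]) acc
    = acc ++ pairF (tokens.drop i) := by
  induction hn : tokens.length - i generalizing i acc with
  | zero =>
    have hi : i = tokens.length := by omega
    subst hi
    rw [PySem.List.pyRange_one_eq_nil (by omega)]
    simp [List.drop_of_length_le, pairF]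
  | succ n ih =>
    have hi : i < tokens.length := by omega
    rw [PySem.List.pyRange_one_cons (by exact_mod_cast hi)]
    have hget : PySem.List.pyGetD tokens (i : Int) "" = tokens[i] := by
      rw [PySem.List.pyGetD_natCast]; exact List.getD_eq_getElem _ _ hi
    have hdrop : tokens.drop i = tokens[i] :: tokens.drop (i + 1) :=
      List.drop_eq_getElem_cons hi
    simp only [List.foldl_cons]
    by_cases hlast : i + 1 = tokens.length
    · -- last index: kept
      have heq : (i : Int) + 1 = (tokens.length : Int) := by exact_mod_cast hlast
      rw [if_neg (fun hc => hc.1 heq)]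
      rw [PySem.List.pyRange_one_eq_nil (by omega)]
      simp only [List.foldl_nil]
      rw [hget, hdrop]
      have : tokens.drop (i + 1) = [] := List.drop_of_length_le (by omega)
      simp [this, pairF]
    · have hi1 : i + 1 < tokens.length := by omega
      have hget1 : PySem.List.pyGetD tokens ((i : Int) + 1) "" = tokens[i + 1] := by
        have : ((i : Int) + 1) = ((i + 1 : Nat) : Int) := by push_cast; ring
        rw [this, PySem.List.pyGetD_natCast]
        exact List.getD_eq_getElem _ _ hi1
      have hdrop1 : tokens.drop (i + 1) = tokens[i + 1] :: tokens.drop (i + 2) :=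
        List.drop_eq_getElem_cons hi1
      have hpair : pairF (tokens.drop i)
          = if PySem.Str.startswith tokens[i] "@" = true ∧
               PySem.Str.startswith tokens[i + 1] "@" = true
            then pairF (tokens.drop (i + 1)) else tokens[i] :: pairF (tokens.drop (i + 1)) := by
        rw [hdrop, hdrop1]
        rfl
      have hcast : ((i : Int) + 1) = (((i + 1 : Nat)) : Int) := by push_cast; ring
      by_cases hat : PySem.Str.startswith tokens[i] "@" = true ∧
          PySem.Str.startswith tokens[i + 1] "@" = true
      · have hne : (i : Int) + 1 ≠ (tokens.length : Int) := by exact_mod_cast hlast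
        rw [if_pos ⟨hne, by rw [hget]; exact hat.1, by rw [hget1]; exact hat.2⟩]
        rw [hcast, ih (i + 1) acc (by omega) (by omega)]
        rw [hpair, if_pos hat]
      · rw [if_neg (by rw [hget, hget1]; tauto)]
        rw [hcast, ih (i + 1) (acc ++ [PySem.List.pyGetD tokens (i : Int) ""]) (by omega) (by omega)]
        rw [hpair, if_neg hat, hget]
        simp

-- ===== VERDICT (by name: the statement is the Claim_ definition above) =====
theorem refer_normalize_spec : Claim_equal_refer_normalize := by
  intro tokens _
  show refer_normalize tokens = refer_normalize_alt tokens
  rw [alt_eq_pairF]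
  have := loopA tokens 0 [] (Nat.zero_le _)
  simpa [refer_normalize] using this
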